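-- pv_equiv track=rewrite | github.com/Hiraoka-Group/rsu-project | rsuanalyzer/ranker/conf_group.py | conf_id_to_ids_in_same_group
-- ===== SOURCE A (Python) =====
-- def conf_id_to_ids_in_same_group(conf_id: str) -> set[str]:
--     """
--     Convert a conformation ID to a set of conformation IDs in the same group.
--
--     There can be multiple conformation IDs for the same
--     ring structure. We define the conformation IDs that are equivalent
--     to each other as "in the same group".
--
--     Four patterns and their combinations are considered.
--     Pattern 1: Different cut points.
--     e.g. "RRFFLLBB" and "LLBBRRFF"
--     Pattern 2: Reversed conformation IDs.
--     e.g. "RRFFLLBB" and "LLFFRRBB"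
--     Pattern 3: Enantiomers.
--     e.g. "RRFFLLBB" and "LLFFRRBB"
--
--     Args:
--     - conf_id (str): The conformation ID.
--
--     Returns:
--     - set[str]: The conformation IDs in the same group.
--
--     Examples:
--     >>> conf_id_to_ids_in_same_group("RRFFLLBB")
--     {"RRFFLLBB", "LLBBRRFF", "LLFFRRBB", "RRBBLLFF"}
--     >>> conf_id_to_ids_in_same_group("RLFBRRFF")
--     {"RLFBRRFF", "RRFFRLFB", "RRBFLRFF", "LRFFRRBF",
--      "LRFBLLFF", "LLFFLRFB", "LLBFRLFF", "RLFFLLBF"}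
--     """
--
--     num_of_ligs = len(conf_id) // 4
--     ids = {conf_id}
--
--     # Pattern 1
--     # e.g. "RRFFLLBB" and "LLBBRRFF"
--     for i in range(1, num_of_ligs):
--         ids.add(conf_id[i*4:] + conf_id[:i*4])
--
--     # Pattern 2
--     # e.g. "RRFFLLBB" and "LLFFRRBB"
--     for cur_id in ids.copy():
--         rev = cur_id[-1::-1]  # "RRFFLLBB" -> "BBLLFFRR"
--         ids.add(rev[2:] + rev[:2])  # "BBLLFFRR" -> "LLFFRRBB"
--
--     # Pattern 3
--     # e.g. "RRFFLLBB" and "LLFFRRBB"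
--     for cur_id in ids.copy():
--         enant = cur_id.translate(str.maketrans("RL", "LR"))  # "RRFFLLBB" -> "LLBBRRFF"
--         ids.add(enant)
--
--     return ids
-- ===== SOURCE B (Python) =====
-- def conf_id_to_ids_in_same_group(conf_id: str) -> set[str]:
--     # Closed-form generation: double the ID once (d), and take its reversal (rd)
--     # and the R/L-swapped copies of both (e, re_).  Every member of the group is
--     # then a single length-L slice of one of these four precomputed strings:
--     # rotations start at 4*i in d/e, reversed-and-recut IDs start at (2-4*i)%L
--     # in rd/re_.  One dedup at the end.
--     if not conf_id:
--         return {conf_id}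
--     L = len(conf_id)
--     m = max(L // 4, 1)
--     d = conf_id + conf_id
--     rd = d[::-1]
--     swap = str.maketrans("RL", "LR")
--     e, re_ = d.translate(swap), rd.translate(swap)
--     variants = []
--     for src, back in ((d, False), (rd, True), (e, False), (re_, True)):
--         for i in range(m):
--             c = (2 - 4 * i) % L if back else 4 * i
--             variants.append(src[c:c + L])
--     return set(variants)
-- ===== Notes on version B (the rewrite author's own statement) =====
-- stated objective: alternative
-- what changed: Instead of A's three staged passes of per-member string transformations (slicing rotations, then reversing+recutting, then translating members of a growing set), B precomputes the doubled ID, its reversal and the R/L-swapped copies of both, reads every group member off as a single closed-form slice (rotations at 4*i, reversed-recut IDs at (2-4*i)%L) in one loop, and deduplicates once at the end.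
import Mathlib
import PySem

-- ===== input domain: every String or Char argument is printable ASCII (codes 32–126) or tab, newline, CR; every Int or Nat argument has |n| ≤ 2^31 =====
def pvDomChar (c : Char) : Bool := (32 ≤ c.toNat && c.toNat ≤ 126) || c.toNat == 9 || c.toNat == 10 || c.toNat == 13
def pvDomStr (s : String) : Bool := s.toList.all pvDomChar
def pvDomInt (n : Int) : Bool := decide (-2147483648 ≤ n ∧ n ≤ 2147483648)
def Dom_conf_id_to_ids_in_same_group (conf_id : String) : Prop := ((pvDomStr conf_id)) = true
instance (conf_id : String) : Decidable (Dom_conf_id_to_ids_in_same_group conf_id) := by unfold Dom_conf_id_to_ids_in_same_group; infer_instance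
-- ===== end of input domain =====

-- B replaces A's three staged string-transformation passes over a growing set by
-- closed-form generation: it doubles the ID once (plus its reversal and the R/L-swapped
-- copies of both) and reads every group member off as a single slice, deduplicating once
-- (objective: alternative; same asymptotic cost).


-- ===== PORT A =====
def conf_id_to_ids_in_same_group (conf_id : String) : List String :=
  let num_of_ligs : Int := PySem.Int.floordiv (PySem.Str.len conf_id) 4
  let ids : PySem.Set String := PySem.Set.add PySem.Set.empty conf_id
  -- Pattern 1
  let ids := (PySem.List.pyRange 1 num_of_ligs 1).foldl (fun acc i =>
      PySem.Set.add acc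
        (PySem.Str.slice conf_id (some (i * 4)) none ++ PySem.Str.slice conf_id none (some (i * 4)))) ids
  -- Pattern 2 (cur_id[-1::-1] has step -1 ≠ 0, so slice? never returns none; getD is unreachable)
  let ids := ids.foldl (fun acc cur_id =>
      let rev := (PySem.Str.slice? cur_id (some (-1)) none (-1)).getD ""
      PySem.Set.add acc (PySem.Str.slice rev (some 2) none ++ PySem.Str.slice rev none (some 2))) ids
  -- Pattern 3 (translate(str.maketrans("RL","LR")) ported by hand: exact — maps 'R'↔'L', all other code points unchanged)
  let ids := ids.foldl (fun acc cur_id =>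
      PySem.Set.add acc
        (String.ofList (cur_id.toList.map (fun c => if c == 'R' then 'L' else if c == 'L' then 'R' else c)))) ids
  ids

-- ===== PORT B =====
-- translate(str.maketrans("RL","LR")) ported by hand: exact — maps 'R'↔'L', all other code points unchanged
def pvEnantiomer (s : String) : String :=
  String.ofList (s.toList.map (fun c => if c == 'R' then 'L' else if c == 'L' then 'R' else c))

-- d[::-1] has step -1 ≠ 0, so slice? never returns none; getD is unreachable
def conf_id_to_ids_in_same_group_alt (conf_id : String) : List String :=
  if conf_id = "" then [conf_id] else
  let L : Int := PySem.Str.len conf_id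
  let m : Int := max (PySem.Int.floordiv L 4) 1
  let d := conf_id ++ conf_id
  let rd := (PySem.Str.slice? d none none (-1)).getD ""
  let e := pvEnantiomer d
  let re := pvEnantiomer rd
  let variants := [(d, false), (rd, true), (e, false), (re, true)].foldl (fun acc sb =>
    (PySem.List.pyRange 0 m 1).foldl (fun acc i =>
      let c : Int := if sb.2 then PySem.Int.mod (2 - 4 * i) L else 4 * i
      acc ++ [PySem.Str.slice sb.1 (some c) (some (c + L))]) acc) ([] : List String)
  PySem.Set.ofList variants

-- ===== PRECONDITION & SPEC =====
def Spec_conf_id_to_ids_in_same_group (conf_id : String) (out : List String) : Prop := out = conf_id_to_ids_in_same_group_alt conf_id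
instance (conf_id : String) (out : List String) : Decidable (Spec_conf_id_to_ids_in_same_group conf_id out) := by unfold Spec_conf_id_to_ids_in_same_group; infer_instance

-- ===== CLAIM (what is proved, stated in full; the proofs are below) =====
def Claim_equal_conf_id_to_ids_in_same_group : Prop := ∀ (conf_id : String), Dom_conf_id_to_ids_in_same_group conf_id → Spec_conf_id_to_ids_in_same_group conf_id (conf_id_to_ids_in_same_group conf_id)

-- ===== LEMMAS AND PROOFS =====

-- the slice-based transforms A applies (proof-side helpers)
def pvRot (s : String) (i : Int) : String :=
  PySem.Str.slice s (some (i * 4)) none ++ PySem.Str.slice s none (some (i * 4))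

def pvRevVariant (s : String) : String :=
  let r := (PySem.Str.slice? s none none (-1)).getD ""
  PySem.Str.slice r (some 2) none ++ PySem.Str.slice r none (some 2)

-- s[-1::-1] normalises to the same index triple as s[::-1]
theorem pvSliceIndices_neg_one (n : Nat) :
    PySem.List.sliceIndices n (some (-1)) none (-1) = PySem.List.sliceIndices n none none (-1) := by
  simp [PySem.List.sliceIndices]
  omega

theorem pvSliceNegOneStart (s : String) :
    PySem.Str.slice? s (some (-1)) none (-1) = PySem.Str.slice? s none none (-1) := by
  unfold PySem.Str.slice? PySem.Chars.slice? PySem.List.slice?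
  rw [pvSliceIndices_neg_one]

-- adding a member is a no-op
theorem pvAdd_of_mem {x : String} {s : PySem.Set String} (h : x ∈ s) : PySem.Set.add s x = s := by
  simp [PySem.Set.add, PySem.Set.contains, h]

theorem pvAdd_of_not_mem {x : String} {s : PySem.Set String} (h : ¬ x ∈ s) :
    PySem.Set.add s x = s ++ [x] := by
  simp [PySem.Set.add, PySem.Set.contains, h]

-- the key reshuffle: folding in the images of an already-deduplicated merge is the same as
-- folding in the raw images, once the images of the existing part are folded in first
theorem pvUpdate_map_update (f : String → String) (l : List String) :
    ∀ (t s : PySem.Set String),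
      PySem.Set.update s ((PySem.Set.update t l).map f)
        = PySem.Set.update (PySem.Set.update s (t.map f)) (l.map f) := by
  induction l with
  | nil => intro t s; simp [PySem.Set.update]
  | cons x l ih =>
    intro t s
    have hstep : PySem.Set.update t (x :: l) = PySem.Set.update (PySem.Set.add t x) l := by
      simp [PySem.Set.update]
    have hsub : PySem.Set.update s ((PySem.Set.add t x).map f)
        = PySem.Set.update s (t.map f ++ [f x]) := by
      by_cases hx : x ∈ t
      · rw [pvAdd_of_mem hx]
        have hfx : f x ∈ PySem.Set.update s (t.map f) :=
          (PySem.Set.mem_update _ _ _).2 (Or.inr (List.mem_map_of_mem hx))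
        have hupd : PySem.Set.update s (t.map f ++ [f x])
            = PySem.Set.add (PySem.Set.update s (t.map f)) (f x) := by
          simp [PySem.Set.update]
        rw [hupd, pvAdd_of_mem hfx]
      · rw [pvAdd_of_not_mem hx, List.map_append]; rfl
    rw [hstep, ih (PySem.Set.add t x) s, hsub]
    show PySem.Set.update (PySem.Set.update s (t.map f ++ [f x])) (l.map f) = _
    simp [PySem.Set.update]

-- updating with the images of a deduplicated list = updating with the raw images
theorem pvUpdate_map_ofList (f : String → String) (l : List String) (s : PySem.Set String) :
    PySem.Set.update s ((PySem.Set.ofList l).map f) = PySem.Set.update s (l.map f) := by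
  simpa [PySem.Set.update, PySem.Set.ofList, PySem.Set.empty] using pvUpdate_map_update f l [] s

-- a "for x in t: s.add(g(x))" loop is an update by the mapped list
theorem pvFoldl_add_eq_update {a : Type} (g : a -> String) (s : PySem.Set String) (t : List a) :
    t.foldl (fun acc c => PySem.Set.add acc (g c)) s = PySem.Set.update s (t.map g) := by
  simp [PySem.Set.update, List.foldl_map]

theorem pvOfList_append (xs ys : List String) :
    PySem.Set.ofList (xs ++ ys) = PySem.Set.update (PySem.Set.ofList xs) ys := by
  simp [PySem.Set.ofList, PySem.Set.update, List.foldl_append]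

-- rotation by 0 blocks is the string itself
theorem pvRotZero (s : String) : pvRot s 0 = s := by
  unfold pvRot
  norm_num
  simp [PySem.Str.slice, PySem.Chars.slice, PySem.List.slice, List.take_of_length_le]

-- A's pattern-1 loop from {conf_id} builds exactly the rotation list, deduplicated
theorem pvRotations (num : Int) (h0 : 0 <= num) (rot : Int -> String) (x : String) (hx : rot 0 = x) :
    PySem.Set.update (PySem.Set.add PySem.Set.empty x) ((PySem.List.pyRange 1 num 1).map rot)
      = PySem.Set.ofList ((PySem.List.pyRange 0 (max num 1) 1).map rot) := by
  subst hx
  rcases eq_or_lt_of_le h0 with h | h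
  · have h1 : PySem.List.pyRange 1 num 1 = [] := by subst h; decide
    have h2 : max num 1 = 1 := by omega
    subst h; rw [h1, h2]
    simp [PySem.Set.update, PySem.Set.ofList, PySem.Set.add, PySem.Set.empty, PySem.Set.contains,
      PySem.List.pyRange]
  · have h2 : max num 1 = num := by omega
    rw [h2, PySem.List.pyRange_one_cons h]
    simp [PySem.Set.ofList, PySem.Set.update, PySem.Set.add, PySem.Set.empty, PySem.Set.contains]

-- A's port equals the deduplication of the stage list (rotations, their reversal variants,
-- then the enantiomers of both)
theorem pvA_eq_stage (conf_id : String) :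
    conf_id_to_ids_in_same_group conf_id =
      (let rots := (PySem.List.pyRange 0 (max (PySem.Int.floordiv (PySem.Str.len conf_id) 4) 1) 1).map
          (pvRot conf_id)
       let stage := rots ++ rots.map pvRevVariant
       PySem.Set.ofList (stage ++ stage.map pvEnantiomer)) := by
  simp only [conf_id_to_ids_in_same_group]
  rw [pvFoldl_add_eq_update, pvFoldl_add_eq_update, pvFoldl_add_eq_update]
  simp only [pvSliceNegOneStart]
  rw [show (fun (i : Int) => PySem.Str.slice conf_id (some (i * 4)) none ++
        PySem.Str.slice conf_id none (some (i * 4))) = pvRot conf_id from rfl]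
  rw [pvRotations (PySem.Int.floordiv (PySem.Str.len conf_id) 4) ?h0 _ conf_id (pvRotZero conf_id)]
  case h0 =>
    rw [PySem.Str.len_eq, PySem.Int.floordiv_eq_ediv_of_pos (by norm_num)]
    positivity
  rw [pvOfList_append, pvOfList_append, pvUpdate_map_ofList, ← pvOfList_append,
    pvUpdate_map_ofList]
  have hrv : (List.map pvRevVariant
      : List String → List String) = List.map (fun cur_id =>
        PySem.Str.slice ((PySem.Str.slice? cur_id none none (-1)).getD "") (some 2) none ++
          PySem.Str.slice ((PySem.Str.slice? cur_id none none (-1)).getD "") none (some 2)) := by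
    funext l; simp [pvRevVariant]
  have hen : (List.map pvEnantiomer
      : List String → List String) = List.map (fun cur_id =>
        String.ofList (cur_id.toList.map
          (fun c => if c == 'R' then 'L' else if c == 'L' then 'R' else c))) := by
    funext l; simp [pvEnantiomer]
  rw [hrv, hen, pvOfList_append]


-- slice characterisations: every group member is one slice of the doubled string, its
-- reversal, or their R/L-swapped copies (proved on the character lists)
theorem pvDropTake2 {α : Type} (l : List α) : l.drop 2 ++ l.take 2 = l.rotate 2 := by
  match l with
  | [] => simp
  | [x] => simp [← List.rotate_mod]
  | x :: y :: t =>
    rw [List.rotate_eq_drop_append_take (by simp)]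

theorem pvRot_toList (s : String) (i : Int) (h0 : 0 ≤ i) (h4 : i * 4 ≤ PySem.Str.len s) :
    (pvRot s i).toList = s.toList.rotate (i * 4).toNat := by
  rw [pvRot, String.toList_append, PySem.Str.toList_slice, PySem.Str.toList_slice]
  simp only [PySem.Chars.slice_eq_listSlice]
  rw [PySem.List.slice_from (a := i*4) _ (by positivity), PySem.List.slice_to (b := i*4) _ (by positivity)]
  rw [List.rotate_eq_drop_append_take]
  rw [PySem.Str.len_eq] at h4
  omega

theorem pvRevVariant_toList (s : String) :
    (pvRevVariant s).toList = s.toList.reverse.rotate 2 := by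
  rw [pvRevVariant]
  simp only [PySem.Str.slice?_none_none_neg_one, Option.getD_some]
  rw [String.toList_append, PySem.Str.toList_slice, PySem.Str.toList_slice]
  simp only [PySem.Chars.slice_eq_listSlice]
  rw [PySem.List.slice_from (a := 2) _ (by norm_num), PySem.List.slice_to (b := 2) _ (by norm_num)]
  rw [← pvDropTake2]
  simp [String.toList_ofList]

theorem pvDoubleSlice {α : Type} (l : List α) (a : Nat) (ha : a ≤ l.length) :
    ((l ++ l).drop a).take l.length = l.rotate a := by
  rw [List.rotate_eq_drop_append_take ha, List.drop_append_of_le_length ha, List.take_append]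
  rw [List.take_of_length_le (by simp)]
  congr 1
  congr 1
  simp [Nat.sub_sub_self ha]

theorem pvEnant_toList (t : String) :
    (pvEnantiomer t).toList
      = t.toList.map (fun c => if c == 'R' then 'L' else if c == 'L' then 'R' else c) := by
  rw [pvEnantiomer, String.toList_ofList]

theorem pvEnant_slice (t : String) (c L : Int) (h0 : 0 ≤ c) (hL : 0 ≤ L) :
    PySem.Str.slice (pvEnantiomer t) (some c) (some (c + L))
      = pvEnantiomer (PySem.Str.slice t (some c) (some (c + L))) := by
  apply String.toList_inj.mp
  rw [PySem.Str.toList_slice, pvEnant_toList, pvEnant_toList, PySem.Str.toList_slice]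
  simp only [PySem.Chars.slice_eq_listSlice]
  rw [PySem.List.slice_toNat (a := c) (b := c + L) _ h0 (by omega),
      PySem.List.slice_toNat (a := c) (b := c + L) _ h0 (by omega)]
  simp [List.map_take, List.map_drop]

theorem pvFwdSlice (s : String) (i : Int) (h0 : 0 ≤ i)
    (h4 : i * 4 < PySem.Str.len s) :
    PySem.Str.slice (s ++ s) (some (4 * i)) (some (4 * i + PySem.Str.len s)) = pvRot s i := by
  apply String.toList_inj.mp
  rw [PySem.Str.toList_slice, pvRot_toList s i h0 (by omega)]
  simp only [PySem.Chars.slice_eq_listSlice, String.toList_append]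
  rw [PySem.List.slice_toNat (a := 4 * i) (b := 4 * i + PySem.Str.len s) _ (by positivity) (by rw [PySem.Str.len_eq] at h4 ⊢; omega)]
  have e1 : ((4 * i + PySem.Str.len s).toNat - (4 * i).toNat) = s.toList.length := by
    rw [PySem.Str.len_eq] at h4 ⊢; omega
  have e2 : (4 * i).toNat = (i * 4).toNat := by omega
  rw [e1, e2]
  exact pvDoubleSlice s.toList _ (by rw [PySem.Str.len_eq] at h4; omega)

theorem pvRotate_congr {α : Type} (l : List α) (x y : Nat) (h : x % l.length = y % l.length) :
    l.rotate x = l.rotate y := by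
  rw [← List.rotate_mod, h, List.rotate_mod]

theorem pvBwdSlice (s : String) (hs : s ≠ "") (i : Int) (h0 : 0 ≤ i)
    (h4 : i * 4 < PySem.Str.len s) :
    PySem.Str.slice ((PySem.Str.slice? (s ++ s) none none (-1)).getD "")
        (some (PySem.Int.mod (2 - 4 * i) (PySem.Str.len s)))
        (some (PySem.Int.mod (2 - 4 * i) (PySem.Str.len s) + PySem.Str.len s))
      = pvRevVariant (pvRot s i) := by
  have hl : s.toList ≠ [] := fun hh => hs (by
    have := congrArg String.ofList hh; simpa [String.ofList_toList] using this)
  have hn : 0 < s.toList.length := List.length_pos_iff.2 hl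
  set n := s.toList.length with hn'
  have hlen : PySem.Str.len s = (n : Int) := PySem.Str.len_eq s
  have hnpos : (0 : Int) < (n : Int) := by exact_mod_cast hn
  set c : Int := PySem.Int.mod (2 - 4 * i) (PySem.Str.len s) with hc'
  have hc0 : 0 ≤ c := by rw [hc', hlen]; exact PySem.Int.mod_nonneg _ hnpos
  have hcn : c < (n : Int) := by rw [hc', hlen]; exact PySem.Int.mod_lt _ hnpos
  apply String.toList_inj.mp
  rw [PySem.Str.toList_slice, pvRevVariant_toList, pvRot_toList s i h0 (by omega)]
  simp only [PySem.Chars.slice_eq_listSlice]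
  rw [PySem.Str.slice?_none_none_neg_one]
  simp only [Option.getD_some]
  rw [show (String.ofList (s ++ s).toList.reverse).toList = s.toList.reverse ++ s.toList.reverse by
    rw [String.toList_ofList, String.toList_append, List.reverse_append]]
  rw [PySem.List.slice_toNat (a := c) (b := c + PySem.Str.len s) _ hc0 (by omega)]
  have e1 : ((c + PySem.Str.len s).toNat - c.toNat) = s.toList.reverse.length := by
    rw [hlen]; simp only [List.length_reverse, ← hn']; omega
  rw [e1, pvDoubleSlice s.toList.reverse c.toNat
    (by simp only [List.length_reverse, ← hn']; omega)]
  rw [List.reverse_rotate, List.rotate_rotate]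
  apply pvRotate_congr
  simp only [List.length_reverse, ← hn']
  have ha4 : (i * 4).toNat % n = (i * 4).toNat := Nat.mod_eq_of_lt (by rw [hlen] at h4; omega)
  rw [ha4, Nat.mod_eq_of_lt (by omega : c.toNat < n)]
  -- show c.toNat = (n - (i*4).toNat + 2) % n
  have hint : c = (((n - (i * 4).toNat + 2) % n : Nat) : Int) := by
    rw [hc', hlen, PySem.Int.mod_eq_emod_of_pos hnpos]
    push_cast
    have hx : ((n - (i * 4).toNat : Nat) : Int) = (n : Int) - (i * 4) := by
      rw [hlen] at h4; omega
    rw [Nat.cast_sub (by rw [hlen] at h4; omega)]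
    have h1 : (((i : Int) * 4).toNat : Int) = i * 4 := by omega
    rw [h1]
    have m2 : (n : Int) ≡ 0 [ZMOD (n : Int)] := Int.modulus_modEq_zero
    have : (n : Int) - i * 4 + 2 ≡ 0 - i * 4 + 2 [ZMOD (n : Int)] := (m2.sub_right _).add_right _
    have h2 : (0 : Int) - i * 4 + 2 = 2 - 4 * i := by ring
    rw [h2] at this
    exact this.symm
  omega

-- B's port equals the same deduplicated stage list
theorem pvB_eq_stage (conf_id : String) (h : conf_id ≠ "") :
    conf_id_to_ids_in_same_group_alt conf_id =
      (let rots := (PySem.List.pyRange 0 (max (PySem.Int.floordiv (PySem.Str.len conf_id) 4) 1) 1).map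
          (pvRot conf_id)
       let stage := rots ++ rots.map pvRevVariant
       PySem.Set.ofList (stage ++ stage.map pvEnantiomer)) := by
  simp only [conf_id_to_ids_in_same_group_alt, if_neg h]
  simp only [List.foldl_cons, List.foldl_nil, Bool.false_eq_true, if_false, if_true]
  rw [PySem.List.foldl_append_singleton_eq_map, PySem.List.foldl_append_singleton_eq_map,
      PySem.List.foldl_append_singleton_eq_map, PySem.List.foldl_append_singleton_eq_map]
  have hbound : ∀ i ∈ PySem.List.pyRange 0 (max (PySem.Int.floordiv (PySem.Str.len conf_id) 4) 1) 1,
      0 ≤ i ∧ i * 4 < PySem.Str.len conf_id := by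
    intro i hi
    rw [PySem.List.mem_pyRange_one] at hi
    rw [PySem.Int.floordiv_eq_ediv_of_pos (by norm_num)] at hi
    have hL : (1 : Int) ≤ PySem.Str.len conf_id := by
      rw [PySem.Str.len_eq]
      have hne : conf_id.toList ≠ [] := fun hh => h (by
        have := congrArg String.ofList hh; simpa [String.ofList_toList] using this)
      have := List.length_pos_iff.2 hne
      omega
    omega
  have hfwd : (PySem.List.pyRange 0 (max (PySem.Int.floordiv (PySem.Str.len conf_id) 4) 1) 1).map
      (fun i => PySem.Str.slice (conf_id ++ conf_id) (some (4 * i))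
        (some (4 * i + PySem.Str.len conf_id)))
      = (PySem.List.pyRange 0 (max (PySem.Int.floordiv (PySem.Str.len conf_id) 4) 1) 1).map
      (pvRot conf_id) := by
    apply List.map_congr_left
    intro i hi
    exact pvFwdSlice conf_id i (hbound i hi).1 (hbound i hi).2
  have hbwd : (PySem.List.pyRange 0 (max (PySem.Int.floordiv (PySem.Str.len conf_id) 4) 1) 1).map
      (fun i => PySem.Str.slice ((PySem.Str.slice? (conf_id ++ conf_id) none none (-1)).getD "")
        (some (PySem.Int.mod (2 - 4 * i) (PySem.Str.len conf_id)))
        (some (PySem.Int.mod (2 - 4 * i) (PySem.Str.len conf_id) + PySem.Str.len conf_id)))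
      = ((PySem.List.pyRange 0 (max (PySem.Int.floordiv (PySem.Str.len conf_id) 4) 1) 1).map
      (pvRot conf_id)).map pvRevVariant := by
    rw [List.map_map]
    apply List.map_congr_left
    intro i hi
    exact pvBwdSlice conf_id h i (hbound i hi).1 (hbound i hi).2
  have hefwd : (PySem.List.pyRange 0 (max (PySem.Int.floordiv (PySem.Str.len conf_id) 4) 1) 1).map
      (fun i => PySem.Str.slice (pvEnantiomer (conf_id ++ conf_id)) (some (4 * i))
        (some (4 * i + PySem.Str.len conf_id)))
      = (((PySem.List.pyRange 0 (max (PySem.Int.floordiv (PySem.Str.len conf_id) 4) 1) 1).map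
      (pvRot conf_id)).map pvEnantiomer) := by
    rw [← hfwd, List.map_map]
    apply List.map_congr_left
    intro i hi
    exact pvEnant_slice (conf_id ++ conf_id) (4 * i) (PySem.Str.len conf_id)
      (by have h0 := (hbound i hi).1; positivity) (by have h0 := (hbound i hi).1; have h4 := (hbound i hi).2; omega)
  have hebwd : (PySem.List.pyRange 0 (max (PySem.Int.floordiv (PySem.Str.len conf_id) 4) 1) 1).map
      (fun i => PySem.Str.slice (pvEnantiomer ((PySem.Str.slice? (conf_id ++ conf_id) none none (-1)).getD ""))
        (some (PySem.Int.mod (2 - 4 * i) (PySem.Str.len conf_id)))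
        (some (PySem.Int.mod (2 - 4 * i) (PySem.Str.len conf_id) + PySem.Str.len conf_id)))
      = ((((PySem.List.pyRange 0 (max (PySem.Int.floordiv (PySem.Str.len conf_id) 4) 1) 1).map
      (pvRot conf_id)).map pvRevVariant).map pvEnantiomer) := by
    rw [← hbwd, List.map_map]
    apply List.map_congr_left
    intro i hi
    have h1 : (0 : Int) ≤ PySem.Int.mod (2 - 4 * i) (PySem.Str.len conf_id) :=
      PySem.Int.mod_nonneg _ (by have h0 := (hbound i hi).1; have h4 := (hbound i hi).2; omega)
    exact pvEnant_slice _ _ (PySem.Str.len conf_id) h1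
      (by have h0 := (hbound i hi).1; have h4 := (hbound i hi).2; omega)
  simp only [List.nil_append]
  rw [hfwd, hbwd, hefwd, hebwd]
  simp [List.append_assoc, List.map_append]

-- ===== VERDICT (by name: the statement is the Claim_ definition above) =====
theorem conf_id_to_ids_in_same_group_spec : Claim_equal_conf_id_to_ids_in_same_group := by
  intro conf_id _
  unfold Spec_conf_id_to_ids_in_same_group
  by_cases h : conf_id = ""
  · subst h; decide
  · rw [pvA_eq_stage, pvB_eq_stage conf_id h]
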